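-- pv_equiv track=rewrite | github.com/weiqi-dyania/alpaca-lora | pajm.py | split_justifications
-- ===== SOURCE A (Python) =====
-- from typing import List, Tuple
--
-- def split_justifications(text: str, separators: List[str]) -> List[str]:
--     if not text or not text.strip():
--         return []
--
--     text = text.replace('“', '"').replace('”', '"')
--     current_index = 0
--     separator_indices = []
--     while current_index >= 0: # -1 if there is no match
--         next_idx = float('inf')
--         next_sep = None
--         for sep in separators:
--             idx = text.find(sep, current_index)
--             if idx < 0: # no match
--                 continue
--             if idx < next_idx:
--                 next_idx = idx
--                 next_sep = sep
--         if not next_sep: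
--             break
--         current_end = next_idx + 1
--         next_start = next_idx + len(next_sep) - 1
--         separator_indices += [current_end, next_start]
--         current_index = next_start + 1
--     if not separator_indices: # only one justification
--         return [text]
--
--     separator_indices = [0] + separator_indices + [len(text)]
--     justifications = []
--     for i in range(0, len(separator_indices), 2):
--         start_idx = separator_indices[i]
--         end_idx = separator_indices[i+1]
--         justifications.append(text[start_idx:end_idx].strip("\"' "))
--     return justifications
-- ===== SOURCE B (Python) =====
-- from typing import List
--
--
-- def split_justifications(text: str, separators: List[str]) -> List[str]:
--     # Single left-to-right scan: at each position take the first separator (in list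
--     # order) that matches there, instead of re-running find() for every separator
--     # after each consumed match.
--     if not text or not text.strip():
--         return []
--
--     text = text.replace('“', '"').replace('”', '"')
--     n = len(text)
--     bounds = []          # (start, end) of each justification except the last
--     seg_start = 0
--     i = 0
--     while i <= n:
--         hit = None
--         for sep in separators:
--             if text.startswith(sep, i):
--                 hit = sep
--                 break
--         if hit is None:
--             i += 1
--         elif hit == '':
--             break
--         else:
--             bounds.append((seg_start, i + 1))
--             seg_start = i + len(hit) - 1
--             i += len(hit)
--     if not bounds:
--         return [text]
--     bounds.append((seg_start, n))
--     return [text[a:b].strip("\"' ") for a, b in bounds]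
-- ===== Notes on version B (the rewrite author's own statement) =====
-- stated objective: faster
-- what changed: A repeatedly runs find() for every separator from the current index and takes the minimum match each round (re-scanning the text once per separator per consumed match); B makes one left-to-right scan over the text, taking at each position the first separator in list order that matches there via startswith, and builds the segment bounds directly during the scan.
import Mathlib
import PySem

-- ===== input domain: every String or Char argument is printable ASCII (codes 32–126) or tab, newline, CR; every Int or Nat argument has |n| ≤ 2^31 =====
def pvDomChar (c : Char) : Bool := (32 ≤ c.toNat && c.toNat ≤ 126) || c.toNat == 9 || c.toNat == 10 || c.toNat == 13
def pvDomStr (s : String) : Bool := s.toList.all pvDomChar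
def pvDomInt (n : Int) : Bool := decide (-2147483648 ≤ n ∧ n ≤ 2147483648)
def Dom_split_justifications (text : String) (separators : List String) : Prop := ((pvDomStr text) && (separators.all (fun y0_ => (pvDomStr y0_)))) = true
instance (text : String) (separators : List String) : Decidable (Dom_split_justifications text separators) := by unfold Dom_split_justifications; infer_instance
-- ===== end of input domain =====

-- B replaces A's repeated `find`-over-all-separators minimum with a single left-to-right
-- scan that takes the first separator (in list order) matching at each position (objective: faster, measured).

-- ===== PORT A =====
-- inner `for sep in separators` body: track the earliest match (next_idx, next_sep)
def pvStepA (t : String) (c : Int) (acc : Option (Int × String)) (sep : String) : Option (Int × String) :=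
  let idx := PySem.Str.findFrom t sep c
  if idx < 0 then acc
  else match acc with
    | none => some (idx, sep)
    | some (ni, _) => if idx < ni then some (idx, sep) else acc

def pvFindNext (t : String) (separators : List String) (c : Int) : Option (Int × String) :=
  separators.foldl (pvStepA t c) none

-- the `while current_index >= 0` loop; fuel bounds the iteration count (current_index
-- strictly increases and stays ≤ len(text), so len+2 iterations always suffice)
def pvLoopA (t : String) (separators : List String) : Nat → Int → List Int → List Int
  | 0, _, acc => acc
  | fuel+1, c, acc =>
    if 0 ≤ c then
      match pvFindNext t separators c with
      | none => acc
      | some (ni, sep) =>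
        if sep = "" then acc
        else pvLoopA t separators fuel ((ni + PySem.Str.len sep - 1) + 1)
               (acc ++ [ni + 1, ni + PySem.Str.len sep - 1])
    else acc

-- `for i in range(0, len(separator_indices), 2)` over an even-length index list,
-- transliterated as the two-at-a-time structural recursion
def pvPairSlices (t : String) : List Int → List String
  | s :: e :: rest =>
      PySem.Str.stripChars (PySem.Str.slice t (some s) (some e)) "\"' " :: pvPairSlices t rest
  | _ => []

def split_justifications (text : String) (separators : List String) : List String :=
  if text = "" || PySem.Str.strip text = "" then []
  else
    let t := PySem.Str.replace (PySem.Str.replace text "“" "\"") "”" "\""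
    let inds := pvLoopA t separators (t.length + 2) 0 []
    if inds = [] then [t]
    else pvPairSlices t ([0] ++ inds ++ [PySem.Str.len t])

-- ===== PORT B =====
-- first separator (in list order) matching at the current position
def pvFirstHit (sl : List (List Char)) (suffix : List Char) : Option (List Char) :=
  sl.find? (fun sep => PySem.Chars.startswith suffix sep)

-- the `while i <= n` scan; returns (bounds, seg_start); fuel n+2 always suffices
def pvScanB (tl : List Char) (sl : List (List Char)) :
    Nat → Nat → Nat → List (Nat × Nat) → (List (Nat × Nat) × Nat)
  | 0, _, segStart, acc => (acc, segStart)
  | fuel+1, i, segStart, acc =>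
    if i ≤ tl.length then
      match pvFirstHit sl (tl.drop i) with
      | none => pvScanB tl sl fuel (i+1) segStart acc
      | some sep =>
        if sep = [] then (acc, segStart)
        else pvScanB tl sl fuel (i + sep.length) (i + sep.length - 1) (acc ++ [(segStart, i + 1)])
    else (acc, segStart)

def split_justifications_alt (text : String) (separators : List String) : List String :=
  if text = "" || PySem.Str.strip text = "" then []
  else
    let t := PySem.Str.replace (PySem.Str.replace text "“" "\"") "”" "\""
    let tl := t.toList
    let r := pvScanB tl (separators.map String.toList) (tl.length + 2) 0 0 []
    if r.1 = [] then [t]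
    else (r.1 ++ [(r.2, tl.length)]).map
      (fun p => PySem.Str.stripChars (PySem.Str.slice t (some (p.1 : Int)) (some (p.2 : Int))) "\"' ")

-- ===== PRECONDITION & SPEC =====
def Spec_split_justifications (text : String) (separators : List String) (out : List String) : Prop := out = split_justifications_alt text separators
instance (text : String) (separators : List String) (out : List String) : Decidable (Spec_split_justifications text separators out) := by unfold Spec_split_justifications; infer_instance

-- ===== CLAIM (what is proved, stated in full; the proofs are below) =====
def Claim_equal_split_justifications : Prop := ∀ (text : String) (separators : List String), Dom_split_justifications text separators → Spec_split_justifications text separators (split_justifications text separators)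

-- ===== LEMMAS AND PROOFS =====

-- pairs of consecutive elements (proof-level)
def pvPairsI : List Int → List (Int × Int)
  | a :: b :: rest => (a, b) :: pvPairsI rest
  | _ => []

-- proof-level scan: segments from position c with open segment starting at s,
-- final segment closed at len
def pvSB (tl : List Char) (sl : List (List Char)) (c s : Nat) : List (Nat × Nat) :=
  if h : c ≤ tl.length then
    match pvFirstHit sl (tl.drop c) with
    | none => pvSB tl sl (c+1) s
    | some sep =>
      if hs : sep = [] then [(s, tl.length)]
      else (s, c+1) :: pvSB tl sl (c + sep.length) (c + sep.length - 1)
  else [(s, tl.length)]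
  termination_by tl.length + 1 - c
  decreasing_by
  · omega
  · have : 0 < sep.length := List.length_pos_of_ne_nil hs
    omega

theorem pvLoopA_append (t : String) (seps : List String) :
    ∀ (fuel : Nat) (c : Int) (acc : List Int),
      pvLoopA t seps fuel c acc = acc ++ pvLoopA t seps fuel c [] := by
  intro fuel
  induction fuel with
  | zero => intro c acc; simp [pvLoopA]
  | succ f ih =>
    intro c acc
    simp only [pvLoopA]
    split
    · cases hFN : pvFindNext t seps c with
      | none => simp
      | some p =>
        obtain ⟨ni, sep⟩ := p
        by_cases hs : sep = "" <;> simp [hs]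
        conv_rhs => rw [ih]
        rw [ih _ (acc ++ _)]
        simp
    · simp

theorem pvLoopA_even (t : String) (seps : List String) :
    ∀ (fuel : Nat) (c : Int), (pvLoopA t seps fuel c []).length % 2 = 0 := by
  intro fuel
  induction fuel with
  | zero => intro c; simp [pvLoopA]
  | succ f ih =>
    intro c
    simp only [pvLoopA]
    split
    · cases hFN : pvFindNext t seps c with
      | none => simp
      | some p =>
        obtain ⟨ni, sep⟩ := p
        by_cases hs : sep = "" <;> simp [hs]
        rw [pvLoopA_append]
        have := ih (ni + (sep.length : Int))
        simp only [List.length_append, List.length_cons, List.length_nil]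
        omega
    · simp

theorem pvScanB_append (tl : List Char) (sl : List (List Char)) :
    ∀ (fuel i s : Nat) (acc : List (Nat × Nat)),
      pvScanB tl sl fuel i s acc =
        (acc ++ (pvScanB tl sl fuel i s []).1, (pvScanB tl sl fuel i s []).2) := by
  intro fuel
  induction fuel with
  | zero => intro i s acc; simp [pvScanB]
  | succ f ih =>
    intro i s acc
    simp only [pvScanB]
    split
    · cases hm : pvFirstHit sl (tl.drop i) with
      | none => exact ih _ _ _
      | some sep =>
        by_cases hs : sep = [] <;> simp [hs]
        conv_rhs => rw [ih]
        rw [ih _ _ (acc ++ _)]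
        simp
    · simp

theorem pvStepA_cases (t : String) (c : Int) (acc : Option (Int × String)) (sep : String) :
    (PySem.Str.findFrom t sep c < 0 ∧ pvStepA t c acc sep = acc) ∨
    (¬ PySem.Str.findFrom t sep c < 0 ∧ acc = none ∧
      pvStepA t c acc sep = some (PySem.Str.findFrom t sep c, sep)) ∨
    (∃ ni ss, ¬ PySem.Str.findFrom t sep c < 0 ∧ acc = some (ni, ss) ∧
      PySem.Str.findFrom t sep c < ni ∧
      pvStepA t c acc sep = some (PySem.Str.findFrom t sep c, sep)) ∨
    (∃ ni ss, ¬ PySem.Str.findFrom t sep c < 0 ∧ acc = some (ni, ss) ∧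
      ¬ PySem.Str.findFrom t sep c < ni ∧ pvStepA t c acc sep = acc) := by
  simp only [pvStepA]
  by_cases hneg : PySem.Str.findFrom t sep c < 0
  · exact Or.inl ⟨hneg, by rw [if_pos hneg]⟩
  · rw [if_neg hneg]
    cases acc with
    | none => exact Or.inr (Or.inl ⟨hneg, rfl, rfl⟩)
    | some p =>
      obtain ⟨ni, ss⟩ := p
      by_cases hlt : PySem.Str.findFrom t sep c < ni
      · exact Or.inr (Or.inr (Or.inl ⟨ni, ss, hneg, rfl, hlt, by show (if PySem.Str.findFrom t sep c < ni then _ else _) = _; rw [if_pos hlt]⟩))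
      · exact Or.inr (Or.inr (Or.inr ⟨ni, ss, hneg, rfl, hlt, by show (if PySem.Str.findFrom t sep c < ni then _ else _) = _; rw [if_neg hlt]⟩))

theorem pvFold_some (t : String) (c : Int) :
    ∀ (seps : List String) (acc : Option (Int × String)) (m : Int) (s : String),
      List.foldl (pvStepA t c) acc seps = some (m, s) →
      (∀ ni ss, acc = some (ni, ss) → 0 ≤ ni) →
      0 ≤ m ∧
      (∀ q ∈ seps, ¬ (0 ≤ PySem.Str.findFrom t q c ∧ PySem.Str.findFrom t q c < m)) ∧
      (acc = some (m, s) ∨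
        (PySem.Str.findFrom t s c = m ∧ (∀ ni ss, acc = some (ni, ss) → m < ni) ∧
          ∃ pre post, seps = pre ++ s :: post ∧
            ∀ p ∈ pre, ¬ (0 ≤ PySem.Str.findFrom t p c ∧ PySem.Str.findFrom t p c ≤ m))) := by
  intro seps
  induction seps with
  | nil =>
    intro acc m s h hnn
    simp only [List.foldl_nil] at h
    exact ⟨hnn m s h, by simp, Or.inl h⟩
  | cons sep rest ih =>
    intro acc m s h hnn
    simp only [List.foldl_cons] at h
    rcases pvStepA_cases t c acc sep with
      ⟨hneg, hstep⟩ | ⟨hneg, hacc, hstep⟩ |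
      ⟨ni, ss, hneg, hacc, hlt, hstep⟩ | ⟨ni, ss, hneg, hacc, hlt, hstep⟩
    · -- g sep < 0, step keeps acc
      rw [hstep] at h
      obtain ⟨hm0, h1, hdisj⟩ := ih acc m s h hnn
      refine ⟨hm0, ?_, ?_⟩
      · intro q hq
        rcases List.mem_cons.mp hq with hq | hq
        · subst hq; omega
        · exact h1 q hq
      · rcases hdisj with hl | ⟨hg, hbeat, pre, post, hdec, hpre⟩
        · exact Or.inl hl
        · refine Or.inr ⟨hg, hbeat, sep :: pre, post, by simp [hdec], ?_⟩
          intro p hp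
          rcases List.mem_cons.mp hp with hp | hp
          · subst hp; omega
          · exact hpre p hp
    · -- acc = none, step inserts (g sep, sep)
      subst hacc
      rw [hstep] at h
      have hnn' : ∀ ni' ss', some (PySem.Str.findFrom t sep c, sep) = some (ni', ss') → 0 ≤ ni' := by
        intro ni' ss' he; injection he with he1; injection he1 with he1 he2; omega
      obtain ⟨hm0, h1, hdisj⟩ := ih _ m s h hnn'
      rcases hdisj with hl | ⟨hg, hbeat, pre, post, hdec, hpre⟩
      · injection hl with hl1; injection hl1 with hl1 hl2
        subst hl2
        refine ⟨hm0, ?_, Or.inr ⟨by omega, by intro _ _ he; exact absurd he (by simp), [], rest, by simp, by simp⟩⟩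
        intro q hq
        rcases List.mem_cons.mp hq with hq | hq
        · subst hq; omega
        · exact h1 q hq
      · have hbs := hbeat _ _ rfl
        refine ⟨hm0, ?_, Or.inr ⟨hg, by intro _ _ he; exact absurd he (by simp), sep :: pre, post, by simp [hdec], ?_⟩⟩
        · intro q hq
          rcases List.mem_cons.mp hq with hq | hq
          · subst hq; omega
          · exact h1 q hq
        · intro p hp
          rcases List.mem_cons.mp hp with hp | hp
          · subst hp; omega
          · exact hpre p hp
    · -- acc = some (ni, ss) beaten by g sep
      subst hacc
      rw [hstep] at h
      have hnn' : ∀ ni' ss', some (PySem.Str.findFrom t sep c, sep) = some (ni', ss') → 0 ≤ ni' := by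
        intro ni' ss' he; injection he with he1; injection he1 with he1 he2; omega
      obtain ⟨hm0, h1, hdisj⟩ := ih _ m s h hnn'
      have hbeatacc : ∀ ni' ss', some (ni, ss) = some (ni', ss') → m < ni' := by
        intro ni' ss' he; injection he with he1; injection he1 with he1 he2
        subst he1
        rcases hdisj with hl | ⟨_, hbeat, _⟩
        · injection hl with hl1; injection hl1 with hl1 hl2; omega
        · have := hbeat _ _ rfl; omega
      rcases hdisj with hl | ⟨hg, hbeat, pre, post, hdec, hpre⟩
      · injection hl with hl1; injection hl1 with hl1 hl2
        subst hl2
        refine ⟨hm0, ?_, Or.inr ⟨by omega, hbeatacc, [], rest, by simp, by simp⟩⟩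
        intro q hq
        rcases List.mem_cons.mp hq with hq | hq
        · subst hq; omega
        · exact h1 q hq
      · have hbs := hbeat _ _ rfl
        refine ⟨hm0, ?_, Or.inr ⟨hg, hbeatacc, sep :: pre, post, by simp [hdec], ?_⟩⟩
        · intro q hq
          rcases List.mem_cons.mp hq with hq | hq
          · subst hq; omega
          · exact h1 q hq
        · intro p hp
          rcases List.mem_cons.mp hp with hp | hp
          · subst hp; omega
          · exact hpre p hp
    · -- acc = some (ni, ss) kept, ni ≤ g sep
      subst hacc
      rw [hstep] at h
      obtain ⟨hm0, h1, hdisj⟩ := ih _ m s h hnn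
      have hml : m ≤ ni := by
        rcases hdisj with hl | ⟨_, hbeat, _⟩
        · injection hl with hl1; injection hl1 with hl1 hl2; omega
        · have := hbeat _ _ rfl; omega
      refine ⟨hm0, ?_, ?_⟩
      · intro q hq
        rcases List.mem_cons.mp hq with hq | hq
        · subst hq; omega
        · exact h1 q hq
      · rcases hdisj with hl | ⟨hg, hbeat, pre, post, hdec, hpre⟩
        · exact Or.inl hl
        · have := hbeat _ _ rfl
          refine Or.inr ⟨hg, hbeat, sep :: pre, post, by simp [hdec], ?_⟩
          intro p hp
          rcases List.mem_cons.mp hp with hp | hp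
          · subst hp; omega
          · exact hpre p hp

theorem pvFold_none (t : String) (c : Int) :
    ∀ (seps : List String) (acc : Option (Int × String)),
      List.foldl (pvStepA t c) acc seps = none →
      acc = none ∧ ∀ sep ∈ seps, PySem.Str.findFrom t sep c < 0 := by
  intro seps
  induction seps with
  | nil => intro acc h; simp at h; simp [h]
  | cons sep rest ih =>
    intro acc h
    simp only [List.foldl_cons] at h
    obtain ⟨h1, h2⟩ := ih _ h
    simp only [pvStepA, PySem.Str.findFrom_eq] at h1
    by_cases hneg : PySem.Chars.findFrom t.toList sep.toList c < 0
    · simp only [if_pos hneg] at h1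
      refine ⟨h1, ?_⟩
      intro q hq
      rcases List.mem_cons.mp hq with hq | hq
      · subst hq; simpa [PySem.Str.findFrom_eq] using hneg
      · exact h2 q hq
    · rw [if_neg hneg] at h1
      cases acc with
      | none => simp at h1
      | some p =>
        obtain ⟨ni, ss⟩ := p
        by_cases hlt : PySem.Chars.findFrom t.toList sep.toList c < ni <;> simp [hlt] at h1

-- no separator matches at position i
theorem pvNeg_find (tl sub : List Char) (k : Nat) (hk : k ≤ tl.length)
    (h : PySem.Chars.findFrom tl sub (k : Int) < 0) :
    PySem.Chars.find (tl.drop k) sub = -1 := by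
  rw [PySem.Chars.findFrom_natCast tl sub k hk] at h
  by_cases hf : PySem.Chars.find (tl.drop k) sub = -1
  · exact hf
  · rw [if_neg hf] at h
    have := PySem.Chars.neg_one_le_find (tl.drop k) sub
    omega

theorem pvNoMatchAll (tl sub : List Char) (k i : Nat) (hk : k ≤ i)
    (hfind : PySem.Chars.find (tl.drop k) sub = -1) : ¬ sub <+: tl.drop i := by
  intro hpre
  have hinf : sub <:+: tl.drop k := by
    refine (PySem.Chars.isIn_iff_infix _ _).mp ((PySem.Chars.exists_prefix_drop_iff_isIn _ _).mp ⟨i - k, ?_⟩)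
    have hik : k + (i - k) = i := by omega
    rw [List.drop_drop, hik]
    exact hpre
  exact (PySem.Chars.find_eq_neg_one_iff _ _).mp hfind hinf

theorem pvFN_none (t : String) (seps : List String) (k : Nat) (hk : k ≤ t.toList.length)
    (h : pvFindNext t seps (k : Int) = none) :
    ∀ i, k ≤ i → i ≤ t.toList.length →
      pvFirstHit (seps.map String.toList) (t.toList.drop i) = none := by
  intro i hki hin
  obtain ⟨-, hall⟩ := pvFold_none t (k : Int) seps none h
  refine List.find?_eq_none.mpr ?_
  intro x hx
  obtain ⟨sep, hsep, rfl⟩ := List.mem_map.mp hx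
  have hneg : PySem.Chars.findFrom t.toList sep.toList (k : Int) < 0 := by
    have := hall sep hsep
    simpa [PySem.Str.findFrom_eq] using this
  have hfind := pvNeg_find t.toList sep.toList k hk hneg
  intro hsw
  exact pvNoMatchAll t.toList sep.toList k i hki hfind ((PySem.Chars.startswith_iff _ _).mp hsw)

theorem pvFN_some (t : String) (seps : List String) (k : Nat) (hk : k ≤ t.toList.length)
    (m : Int) (s : String) (h : pvFindNext t seps (k : Int) = some (m, s)) :
    ∃ j : Nat, m = (j : Int) ∧ k ≤ j ∧ j + s.toList.length ≤ t.toList.length ∧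
      (∀ i, k ≤ i → i < j → pvFirstHit (seps.map String.toList) (t.toList.drop i) = none) ∧
      pvFirstHit (seps.map String.toList) (t.toList.drop j) = some s.toList := by
  obtain ⟨hm0, h1, hdisj⟩ := pvFold_some t (k : Int) seps none m s h (by simp)
  rcases hdisj with hl | ⟨hg, -, pre, post, hdec, hpre⟩
  · exact absurd hl (by simp)
  have hgc : PySem.Chars.findFrom t.toList s.toList (k : Int) = m := by
    simpa [PySem.Str.findFrom_eq] using hg
  have hne : PySem.Chars.findFrom t.toList s.toList (k : Int) ≠ -1 := by omega
  obtain ⟨hkm, hpref, hmin⟩ := PySem.Chars.findFrom_natCast_spec t.toList s.toList k hk hne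
  rw [hgc] at hkm hpref hmin
  set n := t.toList.length with hn
  have hmn : m ≤ (n : Int) := by
    rw [PySem.Chars.findFrom_natCast t.toList s.toList k hk] at hgc
    by_cases hf : PySem.Chars.find (t.toList.drop k) s.toList = -1
    · rw [if_pos hf] at hgc; omega
    · rw [if_neg hf] at hgc
      have := PySem.Chars.find_le_length (t.toList.drop k) s.toList
      rw [List.length_drop] at this
      omega
  refine ⟨m.toNat, by omega, by omega, ?_, ?_, ?_⟩
  · -- match fits
    have hlen := hpref.length_le
    rw [List.length_drop] at hlen
    omega
  · -- no hit strictly before j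
    intro i hki hij
    refine List.find?_eq_none.mpr ?_
    intro x hx
    obtain ⟨q, hq, rfl⟩ := List.mem_map.mp hx
    have hq1 := h1 q hq
    simp only [PySem.Str.findFrom_eq] at hq1
    intro hsw
    have hqpre := (PySem.Chars.startswith_iff _ _).mp hsw
    by_cases hneg : PySem.Chars.findFrom t.toList q.toList (k : Int) < 0
    · exact pvNoMatchAll t.toList q.toList k i hki (pvNeg_find t.toList q.toList k hk hneg) hqpre
    · have hge : m ≤ PySem.Chars.findFrom t.toList q.toList (k : Int) := by omega
      obtain ⟨-, -, hqmin⟩ := PySem.Chars.findFrom_natCast_spec t.toList q.toList k hk (by omega)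
      exact hqmin i hki (by omega) hqpre
  · -- first hit at j is s
    subst hdec
    rw [List.map_append, List.map_cons]
    rw [pvFirstHit, List.find?_append]
    have hprenone : List.find? (fun sep => PySem.Chars.startswith (t.toList.drop m.toNat) sep) (pre.map String.toList) = none := by
      refine List.find?_eq_none.mpr ?_
      intro x hx
      obtain ⟨p, hp, rfl⟩ := List.mem_map.mp hx
      have hp1 := hpre p hp
      simp only [PySem.Str.findFrom_eq] at hp1
      intro hsw
      have hppre := (PySem.Chars.startswith_iff _ _).mp hsw
      by_cases hneg : PySem.Chars.findFrom t.toList p.toList (k : Int) < 0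
      · exact pvNoMatchAll t.toList p.toList k m.toNat (by omega) (pvNeg_find t.toList p.toList k hk hneg) hppre
      · have hgt : m < PySem.Chars.findFrom t.toList p.toList (k : Int) := by omega
        obtain ⟨-, -, hpmin⟩ := PySem.Chars.findFrom_natCast_spec t.toList p.toList k hk (by omega)
        exact hpmin m.toNat (by omega) (by omega) hppre
    rw [hprenone]
    simp only [Option.none_or]
    rw [List.find?_cons_of_pos]
    exact (PySem.Chars.startswith_iff _ _).mpr hpref

theorem pvSB_no_hits (tl : List Char) (sl : List (List Char)) :
    ∀ (d c s : Nat), c + d = tl.length + 1 →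
      (∀ i, c ≤ i → i ≤ tl.length → pvFirstHit sl (tl.drop i) = none) →
      pvSB tl sl c s = [(s, tl.length)] := by
  intro d
  induction d with
  | zero =>
    intro c s hc hno
    rw [pvSB]
    rw [dif_neg (by omega)]
  | succ d ih =>
    intro c s hc hno
    rw [pvSB]
    rw [dif_pos (by omega : c ≤ tl.length)]
    rw [hno c (le_refl c) (by omega)]
    exact ih (c+1) s (by omega) (fun i h1 h2 => hno i (by omega) h2)

theorem pvSB_skip (tl : List Char) (sl : List (List Char)) :
    ∀ (d c s : Nat), c + d ≤ tl.length →
      (∀ i, c ≤ i → i < c + d → pvFirstHit sl (tl.drop i) = none) →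
      pvSB tl sl c s = pvSB tl sl (c + d) s := by
  intro d
  induction d with
  | zero => intro c s _ _; rfl
  | succ d ih =>
    intro c s hc hno
    rw [pvSB]
    rw [dif_pos (by omega : c ≤ tl.length)]
    rw [hno c (le_refl c) (by omega)]
    have harg : c + 1 + d = c + (d + 1) := by omega
    have hrest := ih (c+1) s (by omega) (fun i h1 h2 => hno i (by omega) (by omega))
    rw [harg] at hrest
    exact hrest

theorem pvScanB_to_pvSB (tl : List Char) (sl : List (List Char)) :
    ∀ (fuel i s : Nat), tl.length + 2 ≤ i + fuel →
      (pvScanB tl sl fuel i s []).1 ++ [((pvScanB tl sl fuel i s []).2, tl.length)] =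
        pvSB tl sl i s := by
  intro fuel
  induction fuel with
  | zero =>
    intro i s hfu
    simp only [pvScanB]
    rw [pvSB, dif_neg (by omega)]
    simp
  | succ f ih =>
    intro i s hfu
    by_cases hi : i ≤ tl.length
    · simp only [pvScanB, if_pos hi]
      cases hm : pvFirstHit sl (tl.drop i) with
      | none =>
        rw [pvSB, dif_pos hi, hm]
        exact ih (i+1) s (by omega)
      | some sep =>
        by_cases hs : sep = []
        · subst hs
          rw [pvSB, dif_pos hi, hm]
          change ([] ++ [(s, tl.length)] : List (Nat × Nat)) =
            if _hs : ([] : List Char) = [] then [(s, tl.length)]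
            else (s, i + 1) :: pvSB tl sl (i + List.length ([] : List Char)) (i + List.length ([] : List Char) - 1)
          rw [dif_pos rfl]
          simp
        · simp only [if_neg hs]
          rw [pvScanB_append]
          rw [pvSB, dif_pos hi, hm]
          change _ =
            if _hs : sep = [] then [(s, tl.length)]
            else (s, i + 1) :: pvSB tl sl (i + sep.length) (i + sep.length - 1)
          rw [dif_neg hs]
          have hlen : 0 < sep.length := List.length_pos_of_ne_nil hs
          have hih := ih (i + sep.length) (i + sep.length - 1) (by omega)
          simp only [List.nil_append, List.singleton_append]
          rw [← hih]
          simp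
    · simp only [pvScanB, if_neg hi]
      rw [pvSB, dif_neg hi]
      simp

theorem pvCore (t : String) (seps : List String) :
    ∀ (fuel k s : Nat), k ≤ t.toList.length → t.toList.length + 1 ≤ k + fuel →
      pvPairsI ((s : Int) :: pvLoopA t seps fuel (k : Int) [] ++ [(t.toList.length : Int)]) =
        (pvSB t.toList (seps.map String.toList) k s).map (fun p => ((p.1 : Int), (p.2 : Int))) := by
  intro fuel
  induction fuel with
  | zero => intro k s hk hf; exact absurd hf (by omega)
  | succ f ih =>
    intro k s hk hf
    cases hFN : pvFindNext t seps (k : Int) with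
    | none =>
      have hL : pvLoopA t seps (f+1) (k : Int) [] = [] := by
        simp only [pvLoopA]
        rw [if_pos (by exact_mod_cast Int.natCast_nonneg k), hFN]
      rw [hL]
      rw [pvSB_no_hits t.toList (seps.map String.toList) (t.toList.length + 1 - k) k s (by omega)
        (pvFN_none t seps k hk hFN)]
      simp [pvPairsI]
    | some p =>
      obtain ⟨m, sep⟩ := p
      obtain ⟨j, hmj, hkj, hfit, hnb, hhit⟩ := pvFN_some t seps k hk m sep hFN
      have hjn : j ≤ t.toList.length := by omega
      have hskip := pvSB_skip t.toList (seps.map String.toList) (j - k) k s (by omega)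
        (fun i h1 h2 => hnb i h1 (by omega))
      have hkjk : k + (j - k) = j := by omega
      rw [hkjk] at hskip
      by_cases hsep : sep = ""
      · subst hsep
        have hL : pvLoopA t seps (f+1) (k : Int) [] = [] := by
          simp only [pvLoopA]
          rw [if_pos (by exact_mod_cast Int.natCast_nonneg k), hFN]
          change (if ("" : String) = "" then ([] : List Int)
            else pvLoopA t seps f (m + PySem.Str.len "" - 1 + 1)
              ([] ++ [m + 1, m + PySem.Str.len "" - 1])) = []
          rw [if_pos rfl]
        have hstop : pvSB t.toList (seps.map String.toList) j s = [(s, t.toList.length)] := by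
          rw [pvSB, dif_pos hjn, hhit]
          change (if _hs : ("".toList : List Char) = [] then [(s, t.toList.length)]
            else (s, j + 1) :: pvSB t.toList (seps.map String.toList)
              (j + "".toList.length) (j + "".toList.length - 1)) = _
          rw [dif_pos (show ("".toList : List Char) = [] from rfl)]
        rw [hL, hskip, hstop]
        simp [pvPairsI]
      · have hlnil : sep.toList ≠ [] := by simp [hsep]
        have hl : 0 < sep.toList.length := List.length_pos_of_ne_nil hlnil
        have hL : pvLoopA t seps (f+1) (k : Int) [] =
            (m + 1) :: (m + (sep.toList.length : Int) - 1) ::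
              pvLoopA t seps f (m + (sep.toList.length : Int) - 1 + 1) [] := by
          simp only [pvLoopA]
          rw [if_pos (by exact_mod_cast Int.natCast_nonneg k), hFN]
          change (if sep = "" then ([] : List Int)
            else pvLoopA t seps f (m + PySem.Str.len sep - 1 + 1)
              ([] ++ [m + 1, m + PySem.Str.len sep - 1])) = _
          rw [if_neg hsep]
          rw [pvLoopA_append]
          simp [PySem.Str.len_eq]
        have hcast1 : m + 1 = ((j + 1 : Nat) : Int) := by omega
        have hcast2 : m + (sep.toList.length : Int) - 1 = ((j + sep.toList.length - 1 : Nat) : Int) := by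
          omega
        have hcast3 : m + (sep.toList.length : Int) - 1 + 1 = ((j + sep.toList.length : Nat) : Int) := by
          push_cast; omega
        have hstep : pvSB t.toList (seps.map String.toList) j s =
            (s, j + 1) :: pvSB t.toList (seps.map String.toList)
              (j + sep.toList.length) (j + sep.toList.length - 1) := by
          rw [pvSB, dif_pos hjn, hhit]
          change (if _hs : sep.toList = [] then [(s, t.toList.length)]
            else (s, j + 1) :: pvSB t.toList (seps.map String.toList)
              (j + sep.toList.length) (j + sep.toList.length - 1)) = _
          rw [dif_neg hlnil]
        have hih := ih (j + sep.toList.length) (j + sep.toList.length - 1) (by omega) (by omega)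
        rw [hL, hskip, hstep, hcast1, hcast3, hcast2]
        simp only [List.cons_append, List.map_cons]
        rw [pvPairsI]
        rw [← hih]
        rfl

theorem pvPairsI_length : ∀ l : List Int, (pvPairsI l).length = l.length / 2 := by
  intro l
  match l with
  | [] => simp [pvPairsI]
  | [a] => simp [pvPairsI]
  | a :: b :: rest =>
    simp only [pvPairsI, List.length_cons]
    rw [pvPairsI_length rest]
    omega

theorem pvPairSlices_eq (t : String) :
    ∀ l : List Int, pvPairSlices t l =
      (pvPairsI l).map
        (fun p => PySem.Str.stripChars (PySem.Str.slice t (some p.1) (some p.2)) "\"' ") := by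
  intro l
  match l with
  | [] => simp [pvPairSlices, pvPairsI]
  | [a] => simp [pvPairSlices, pvPairsI]
  | a :: b :: rest =>
    simp only [pvPairSlices, pvPairsI, List.map_cons]
    rw [pvPairSlices_eq t rest]

theorem pv_main (text : String) (separators : List String) :
    split_justifications text separators = split_justifications_alt text separators := by
  unfold split_justifications split_justifications_alt
  split
  · rfl
  · generalize PySem.Str.replace (PySem.Str.replace text "“" "\"") "”" "\"" = T
    show (if pvLoopA T separators (T.length + 2) 0 [] = [] then [T]
        else pvPairSlices T ([0] ++ pvLoopA T separators (T.length + 2) 0 [] ++ [PySem.Str.len T])) =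
      (if (pvScanB T.toList (List.map String.toList separators) (T.toList.length + 2) 0 0 []).1 = []
        then [T]
        else List.map
          (fun p => PySem.Str.stripChars (PySem.Str.slice T (some (p.1 : Int)) (some (p.2 : Int))) "\"' ")
          ((pvScanB T.toList (List.map String.toList separators) (T.toList.length + 2) 0 0 []).1 ++
            [((pvScanB T.toList (List.map String.toList separators) (T.toList.length + 2) 0 0 []).2,
              T.toList.length)]))
    have hlen : T.length = T.toList.length := by simp
    have hcore := pvCore T separators (T.length + 2) 0 0 (by omega) (by omega)
    have hscan := pvScanB_to_pvSB T.toList (separators.map String.toList)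
      (T.toList.length + 2) 0 0 (by omega)
    rw [← hscan] at hcore
    simp only [Nat.cast_zero] at hcore
    have hev := pvLoopA_even T separators (T.length + 2) 0
    have hL1 : (pvPairsI ((0 : Int) :: pvLoopA T separators (T.length + 2) 0 [] ++
        [(T.toList.length : Int)])).length =
        (pvScanB T.toList (separators.map String.toList) (T.toList.length + 2) 0 0 []).1.length + 1 := by
      rw [hcore]
      rw [List.length_map, List.length_append, List.length_cons, List.length_nil]
    rw [pvPairsI_length] at hL1
    simp only [List.length_cons, List.length_append, List.length_nil] at hL1
    have hiff : (pvLoopA T separators (T.length + 2) 0 [] = []) ↔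
        ((pvScanB T.toList (separators.map String.toList) (T.toList.length + 2) 0 0 []).1 = []) := by
      constructor
      · intro h0
        have hz : (pvLoopA T separators (T.length + 2) 0 []).length = 0 := by rw [h0]; rfl
        exact List.length_eq_zero_iff.mp (by omega)
      · intro h0
        have hz : (pvScanB T.toList (separators.map String.toList)
            (T.toList.length + 2) 0 0 []).1.length = 0 := by rw [h0]; rfl
        exact List.length_eq_zero_iff.mp (by omega)
    by_cases h0 : pvLoopA T separators (T.length + 2) 0 [] = []
    · rw [if_pos h0, if_pos (hiff.mp h0)]
    · rw [if_neg h0, if_neg (fun hh => h0 (hiff.mpr hh))]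
      have hstr : PySem.Str.len T = ((T.toList.length : Nat) : Int) := by
        simp [PySem.Str.len_eq]
      rw [hstr]
      have hsing : (([(0 : Int)] : List Int) ++ pvLoopA T separators (T.length + 2) 0 [] ++
          [(T.toList.length : Int)]) =
          (0 : Int) :: pvLoopA T separators (T.length + 2) 0 [] ++ [(T.toList.length : Int)] := by
        simp
      rw [hsing, pvPairSlices_eq, hcore, List.map_map]
      rfl

-- ===== VERDICT (by name: the statement is the Claim_ definition above) =====
theorem split_justifications_spec : Claim_equal_split_justifications := by
  intro text separators _
  unfold Spec_split_justifications
  exact pv_main text separators
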